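-- pv_equiv track=rewrite | github.com/Gonza-e/Aed- | Python/RecursividadIndirecta.py | impar
-- ===== SOURCE A (Python) =====
-- def par(num: int) -> str:
--     if num == 0:
--         return "Es par"
--     else:
--         if (num % 10) % 2 != 0:
--             return impar(num//10)
--         else:
--             return par(num//10)
--
-- def impar(num: int) -> str:
--     if num == 0:
--         return "Es impar"
--     else:
--         if (num % 10) % 2 == 0:
--             return par(num//10)
--         else:
--             return impar(num//10)
-- ===== SOURCE B (Python) =====
-- def impar(num: int) -> str:
--     if num == 0:
--         return "Es impar"
--     if num // 10 == 0:
--         return "Es par" if num % 2 == 0 else "Es impar"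
--     return impar(num // 10)
-- ===== Notes on version B (the rewrite author's own statement) =====
-- stated objective: simpler
-- what changed: Replaced A's two mutually-recursive par/impar state machines (which re-branch on every digit's parity) with one direct recursion that descends to the most significant digit and decides its parity closed-form at the base.
import Mathlib
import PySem

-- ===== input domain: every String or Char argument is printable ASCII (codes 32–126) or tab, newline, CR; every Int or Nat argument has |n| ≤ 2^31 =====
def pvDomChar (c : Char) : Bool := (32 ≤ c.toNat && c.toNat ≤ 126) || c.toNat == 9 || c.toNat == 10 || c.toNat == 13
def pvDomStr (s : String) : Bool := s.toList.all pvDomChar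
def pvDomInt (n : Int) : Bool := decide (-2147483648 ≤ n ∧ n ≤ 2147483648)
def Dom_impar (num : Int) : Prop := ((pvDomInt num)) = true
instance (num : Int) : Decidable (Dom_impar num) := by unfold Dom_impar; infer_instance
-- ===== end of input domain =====

-- B collapses A's mutually-recursive par/impar pair into one recursion to the leading digit; equivalence on num >= 0 (both Pythons raise RecursionError on num < 0).

-- ===== PORT A =====
-- A's mutual recursion on num//10; for num >= 0 (all of Pre_) num//10 = num.toNat/10,
-- so the recursion runs on Nat (exact there; num < 0 is excluded by Pre_impar: Python recurses forever).
mutual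
def parGo (n : Nat) : String :=
  if n = 0 then "Es par"
  else if (n % 10) % 2 ≠ 0 then imparGo (n / 10)
  else parGo (n / 10)
termination_by n
decreasing_by all_goals omega
def imparGo (n : Nat) : String :=
  if n = 0 then "Es impar"
  else if (n % 10) % 2 = 0 then parGo (n / 10)
  else imparGo (n / 10)
termination_by n
decreasing_by all_goals omega
end

def impar (num : Int) : String := imparGo num.toNat

-- ===== PORT B =====
-- single recursion: descend to the most significant digit, decide parity there
def imparAltGo (n : Nat) : String :=
  if n = 0 then "Es impar"
  else if n / 10 = 0 then (if n % 2 = 0 then "Es par" else "Es impar")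
  else imparAltGo (n / 10)
termination_by n
decreasing_by all_goals omega

def impar_alt (num : Int) : String := imparAltGo num.toNat

-- ===== PRECONDITION & SPEC =====
-- Pre_ excludes num < 0, on which Python A (and B) recurse forever and raise RecursionError.
def Pre_impar (num : Int) : Prop := 0 ≤ num
instance (num : Int) : Decidable (Pre_impar num) := by unfold Pre_impar; infer_instance
def pvWitness_impar : Int := 42

def Spec_impar (num : Int) (out : String) : Prop := out = impar_alt num
instance (num : Int) (out : String) : Decidable (Spec_impar num out) := by unfold Spec_impar; infer_instance

-- ===== CLAIM (what is proved, stated in full; the proofs are below) =====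
def Claim_equal_impar : Prop := ∀ (num : Int), Dom_impar num → Pre_impar num → Spec_impar num (impar num)

-- ===== LEMMAS AND PROOFS =====

-- On positive n, both of A's state functions return the parity message of the
-- leading digit, i.e. exactly what B's single recursion computes.
theorem go_eq (n : Nat) (h : n ≠ 0) : parGo n = imparAltGo n ∧ imparGo n = imparAltGo n := by
  induction n using Nat.strong_induction_on with
  | _ n ih =>
    have p0 : parGo 0 = "Es par" := by simp [parGo]
    have i0 : imparGo 0 = "Es impar" := by simp [imparGo]
    by_cases hq : n / 10 = 0
    · have hm : n % 10 = n := by omega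
      constructor
      · rw [parGo, imparAltGo]
        simp only [if_neg h, hq, hm, p0, i0]
        by_cases he : n % 2 = 0 <;> simp [he]
      · rw [imparGo, imparAltGo]
        simp only [if_neg h, hq, hm, p0, i0]
        by_cases he : n % 2 = 0 <;> simp [he]
    · have ihq := ih (n / 10) (Nat.div_lt_self (Nat.pos_of_ne_zero h) (by omega)) hq
      constructor
      · rw [parGo, imparAltGo]
        simp only [if_neg h, if_neg hq]
        by_cases he : (n % 10) % 2 = 0
        · rw [if_neg (not_not_intro he), ihq.1]
        · rw [if_pos he, ihq.2]
      · rw [imparGo, imparAltGo]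
        simp only [if_neg h, if_neg hq]
        by_cases he : (n % 10) % 2 = 0
        · rw [if_pos he, ihq.1]
        · rw [if_neg he, ihq.2]

-- ===== VERDICT (by name: the statement is the Claim_ definition above) =====
theorem impar_spec : Claim_equal_impar := by
  intro num _ _
  unfold Spec_impar impar impar_alt
  by_cases h : num.toNat = 0
  · rw [h]; simp [imparGo, imparAltGo]
  · exact (go_eq num.toNat h).2
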